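-- pv_equiv track=rewrite | github.com/bnchinh/Learn_Korea_Simple | random_words.py | korean_sino_number
-- ===== SOURCE A (Python) =====
-- digits = ['', '일', '이', '삼', '사', '오', '육', '칠', '팔', '구']
--
-- units = ['', '십', '백', '천']
--
-- big_units = ['', '만', '억', '조']
--
-- def korean_sino_number(n):
--     if n == 0:
--         return '영'
--     result = ''
--     str_n = str(n)
--     length = len(str_n)
--     group_count = (length + 3) // 4  # Group by 4 digits
--     str_n = str_n.zfill(group_count * 4)
--     for group_idx in range(group_count):
--         group = str_n[group_idx*4:(group_idx+1)*4]
--         group_read = ''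
--         for idx, digit_char in enumerate(group):
--             digit = int(digit_char)
--             if digit != 0:
--                 if digit == 1 and idx != 3:
--                     group_read += units[3 - idx]
--                 else:
--                     group_read += digits[digit] + units[3 - idx]
--         if group_read:
--             result += group_read + big_units[group_count - group_idx - 1]
--     return result
-- ===== SOURCE B (Python) =====
-- digits = ['', '일', '이', '삼', '사', '오', '육', '칠', '팔', '구']
--
-- units = ['', '십', '백', '천']
--
-- big_units = ['', '만', '억', '조']
--
-- def korean_sino_number(n):
--     # single left-to-right pass over str(n); positional arithmetic replaces zfill + group slicing
--     if n == 0: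
--         return '영'
--     s = str(n)
--     length = len(s)
--     result = ''
--     group_has = False
--     for i, ch in enumerate(s):
--         pos = length - 1 - i
--         d = int(ch)
--         if d != 0:
--             group_has = True
--             if d == 1 and pos % 4 != 0:
--                 result += units[pos % 4]
--             else:
--                 result += digits[d] + units[pos % 4]
--         if pos % 4 == 0:
--             if group_has:
--                 result += big_units[pos // 4]
--             group_has = False
--     return result
-- ===== Notes on version B (the rewrite author's own statement) =====
-- stated objective: simpler
-- what changed: Replaced A's zfill-padding plus nested group-slicing loops by a single left-to-right pass over str(n) that uses positional arithmetic (pos % 4 for the unit, pos // 4 for the big unit) and a per-group nonzero flag.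
import Mathlib
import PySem

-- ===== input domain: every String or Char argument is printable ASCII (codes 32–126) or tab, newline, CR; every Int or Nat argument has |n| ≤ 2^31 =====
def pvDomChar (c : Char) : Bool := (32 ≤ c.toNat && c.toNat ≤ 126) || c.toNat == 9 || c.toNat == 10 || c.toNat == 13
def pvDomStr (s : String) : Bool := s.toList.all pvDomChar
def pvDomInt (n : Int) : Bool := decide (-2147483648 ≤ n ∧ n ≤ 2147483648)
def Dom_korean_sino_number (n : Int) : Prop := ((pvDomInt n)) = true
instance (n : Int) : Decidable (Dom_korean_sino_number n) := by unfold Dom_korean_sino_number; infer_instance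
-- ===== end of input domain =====

-- B replaces A's zfill + nested group-slicing loops by ONE left-to-right pass using positional
-- arithmetic (pos % 4 unit, pos // 4 big unit, per-group nonzero flag); objective: simpler.

-- ===== PORT A =====
-- module-level word tables (strings kept on the List Char side, per the PySem convention)
def digitsK : List (List Char) := [[], ['일'], ['이'], ['삼'], ['사'], ['오'], ['육'], ['칠'], ['팔'], ['구']]
def unitsK : List (List Char) := [[], ['십'], ['백'], ['천']]
def bigUnitsK : List (List Char) := [[], ['만'], ['억'], ['조']]

-- literal port of A; int(digit_char) is none exactly where Python raises ValueError (excluded by Pre_)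
def korean_sino_number (n : Int) : String :=
  if n = 0 then "영" else
  let str_n := PySem.Int.toChars n
  let length := PySem.List.len str_n
  let group_count := PySem.Int.floordiv (length + 3) 4
  let str_n' := PySem.Chars.zfill str_n (group_count * 4)
  let result := (PySem.List.pyRange 0 group_count 1).foldl (fun result group_idx =>
    let group := PySem.List.slice str_n' (some (group_idx * 4)) (some ((group_idx + 1) * 4))
    let group_read := (PySem.List.enumerate group 0).foldl (fun group_read p =>
      let digit := (PySem.Int.ofChars? [p.2]).getD 0
      if digit ≠ 0 then
        if digit = 1 ∧ p.1 ≠ 3 then group_read ++ PySem.List.pyGetD unitsK (3 - p.1) []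
        else group_read ++ (PySem.List.pyGetD digitsK digit [] ++ PySem.List.pyGetD unitsK (3 - p.1) [])
      else group_read) []
    if group_read ≠ [] then result ++ (group_read ++ PySem.List.pyGetD bigUnitsK (group_count - group_idx - 1) []) else result) []
  String.ofList result

-- ===== PORT B =====
-- literal port of B (Source B): one pass over str(n) with positional arithmetic and a group flag
def korean_sino_number_alt (n : Int) : String :=
  if n = 0 then "영" else
  let s := PySem.Int.toChars n
  let length := PySem.List.len s
  let st := (PySem.List.enumerate s 0).foldl (fun st p =>
    let pos := length - 1 - p.1
    let d := (PySem.Int.ofChars? [p.2]).getD 0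
    let st := if d ≠ 0 then
        (st.1 ++ (if d = 1 ∧ PySem.Int.mod pos 4 ≠ 0 then PySem.List.pyGetD unitsK (PySem.Int.mod pos 4) []
          else PySem.List.pyGetD digitsK d [] ++ PySem.List.pyGetD unitsK (PySem.Int.mod pos 4) []), true)
      else st
    if PySem.Int.mod pos 4 = 0 then
      (if st.2 then st.1 ++ PySem.List.pyGetD bigUnitsK (PySem.Int.floordiv pos 4) [] else st.1, false)
    else st) (([] : List Char), false)
  String.ofList st.1

-- ===== PRECONDITION & SPEC =====
-- Pre_ excludes exactly the negative inputs, on which Python A raises ValueError (int('-') inside the loop)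
def Pre_korean_sino_number (n : Int) : Prop := 0 ≤ n
instance (n : Int) : Decidable (Pre_korean_sino_number n) := by unfold Pre_korean_sino_number; infer_instance
def pvWitness_korean_sino_number : Int := (12345)

def Spec_korean_sino_number (n : Int) (out : String) : Prop := out = korean_sino_number_alt n
instance (n : Int) (out : String) : Decidable (Spec_korean_sino_number n out) := by unfold Spec_korean_sino_number; infer_instance

-- ===== CLAIM (what is proved, stated in full; the proofs are below) =====
def Claim_equal_korean_sino_number : Prop := ∀ (n : Int), Dom_korean_sino_number n → Pre_korean_sino_number n → Spec_korean_sino_number n (korean_sino_number n)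

-- ===== LEMMAS AND PROOFS =====

-- the digit value int(c) both ports compute
def pvD (c : Char) : Int := (PySem.Int.ofChars? [c]).getD 0

-- per-character word, indexed by the unit position u = pos % 4 = 3 - idx
def pvWord (u : Int) (c : Char) : List Char :=
  if pvD c ≠ 0 then
    (if pvD c = 1 ∧ u ≠ 0 then PySem.List.pyGetD unitsK u []
     else PySem.List.pyGetD digitsK (pvD c) [] ++ PySem.List.pyGetD unitsK u [])
  else []

-- A's inner loop as a function of the 4-char group
def pvRead (g : List Char) : List Char :=
  (PySem.List.enumerate g 0).foldl (fun group_read p =>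
    let digit := (PySem.Int.ofChars? [p.2]).getD 0
    if digit ≠ 0 then
      if digit = 1 ∧ p.1 ≠ 3 then group_read ++ PySem.List.pyGetD unitsK (3 - p.1) []
      else group_read ++ (PySem.List.pyGetD digitsK digit [] ++ PySem.List.pyGetD unitsK (3 - p.1) [])
    else group_read) []

def pvChunk (g : List Char) (k : Nat) : List Char :=
  if pvRead g = [] then [] else pvRead g ++ PySem.List.pyGetD bigUnitsK (k : Int) []

def pvGroups : List Char → Nat → List Char
  | _, 0 => []
  | p, (k+1) => pvChunk (p.take 4) k ++ pvGroups (p.drop 4) k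

-- B's loop body, parameterised by the total length
def pvBodyB (length : Int) (st : List Char × Bool) (p : Int × Char) : List Char × Bool :=
  let pos := length - 1 - p.1
  let d := (PySem.Int.ofChars? [p.2]).getD 0
  let st := if d ≠ 0 then
      (st.1 ++ (if d = 1 ∧ PySem.Int.mod pos 4 ≠ 0 then PySem.List.pyGetD unitsK (PySem.Int.mod pos 4) []
        else PySem.List.pyGetD digitsK d [] ++ PySem.List.pyGetD unitsK (PySem.Int.mod pos 4) []), true)
    else st
  if PySem.Int.mod pos 4 = 0 then
    (if st.2 then st.1 ++ PySem.List.pyGetD bigUnitsK (PySem.Int.floordiv pos 4) [] else st.1, false)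
  else st

-- A's outer loop body
def pvBodyA (p : List Char) (gc : Int) (result : List Char) (group_idx : Int) : List Char :=
  let group := PySem.List.slice p (some (group_idx * 4)) (some ((group_idx + 1) * 4))
  let group_read := (PySem.List.enumerate group 0).foldl (fun group_read q =>
    let digit := (PySem.Int.ofChars? [q.2]).getD 0
    if digit ≠ 0 then
      if digit = 1 ∧ q.1 ≠ 3 then group_read ++ PySem.List.pyGetD unitsK (3 - q.1) []
      else group_read ++ (PySem.List.pyGetD digitsK digit [] ++ PySem.List.pyGetD unitsK (3 - q.1) [])
    else group_read) []
  if group_read ≠ [] then result ++ (group_read ++ PySem.List.pyGetD bigUnitsK (gc - group_idx - 1) []) else result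

lemma pvCharEq (c d : Char) (h : c.toNat = d.toNat) : c = d := by
  apply Char.ext; exact UInt32.toNat_inj.mp h

lemma pvCharCases (c : Char) (h : c.isDigit = true) :
    c = '0' ∨ c = '1' ∨ c = '2' ∨ c = '3' ∨ c = '4' ∨ c = '5' ∨ c = '6' ∨ c = '7' ∨ c = '8' ∨ c = '9' := by
  have hb : 48 ≤ c.toNat ∧ c.toNat ≤ 57 := by
    revert h
    show (decide _ && decide _) = true → _
    intro h
    simp only [Bool.and_eq_true, decide_eq_true_eq] at h
    exact ⟨h.1, h.2⟩
  obtain ⟨h1, h2⟩ := hb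
  interval_cases hc : c.toNat <;>
    first | (exact Or.inl (pvCharEq c '0' hc)) | (exact Or.inr (Or.inl (pvCharEq c '1' hc))) | (exact Or.inr (Or.inr (Or.inl (pvCharEq c '2' hc)))) | (exact Or.inr (Or.inr (Or.inr (Or.inl (pvCharEq c '3' hc))))) | (exact Or.inr (Or.inr (Or.inr (Or.inr (Or.inl (pvCharEq c '4' hc)))))) | (exact Or.inr (Or.inr (Or.inr (Or.inr (Or.inr (Or.inl (pvCharEq c '5' hc))))))) | (exact Or.inr (Or.inr (Or.inr (Or.inr (Or.inr (Or.inr (Or.inl (pvCharEq c '6' hc)))))))) | (exact Or.inr (Or.inr (Or.inr (Or.inr (Or.inr (Or.inr (Or.inr (Or.inl (pvCharEq c '7' hc))))))))) | (exact Or.inr (Or.inr (Or.inr (Or.inr (Or.inr (Or.inr (Or.inr (Or.inr (Or.inl (pvCharEq c '8' hc)))))))))) | (exact Or.inr (Or.inr (Or.inr (Or.inr (Or.inr (Or.inr (Or.inr (Or.inr (Or.inr (pvCharEq c '9' hc))))))))))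

lemma pvWord_empty_iff (u : Int) (hu : u = 0 ∨ u = 1 ∨ u = 2 ∨ u = 3) (c : Char) (hc : c.isDigit = true) :
    pvWord u c = [] ↔ pvD c = 0 := by
  rcases pvCharCases c hc with rfl | rfl | rfl | rfl | rfl | rfl | rfl | rfl | rfl | rfl <;>
    rcases hu with rfl | rfl | rfl | rfl <;> decide

lemma pvRead_quad (a b c d : Char) :
    pvRead [a, b, c, d] = pvWord 3 a ++ pvWord 2 b ++ pvWord 1 c ++ pvWord 0 d := by
  simp only [pvRead, pvWord, pvD, PySem.List.enumerate_cons, PySem.List.enumerate_nil, List.foldl]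
  norm_num
  split_ifs <;> simp_all

lemma pvChunk_quad (a b c d : Char) (ha : a.isDigit = true) (hb : b.isDigit = true)
    (hc : c.isDigit = true) (hd : d.isDigit = true) (k : Nat) :
    pvChunk [a, b, c, d] k =
      pvWord 3 a ++ pvWord 2 b ++ pvWord 1 c ++ pvWord 0 d ++
        (if (!decide (pvD a = 0) || !decide (pvD b = 0) || !decide (pvD c = 0) || !decide (pvD d = 0))
          then PySem.List.pyGetD bigUnitsK (k : Int) [] else []) := by
  rw [pvChunk, pvRead_quad]
  have hiff : pvWord 3 a ++ pvWord 2 b ++ pvWord 1 c ++ pvWord 0 d = [] ↔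
      (pvD a = 0 ∧ pvD b = 0 ∧ pvD c = 0 ∧ pvD d = 0) := by
    simp [List.append_eq_nil_iff, pvWord_empty_iff 3 (by norm_num) a ha,
      pvWord_empty_iff 2 (by norm_num) b hb, pvWord_empty_iff 1 (by norm_num) c hc,
      pvWord_empty_iff 0 (by norm_num) d hd]
  by_cases hz : pvD a = 0 ∧ pvD b = 0 ∧ pvD c = 0 ∧ pvD d = 0
  · rw [if_pos (hiff.mpr hz)]
    simp [hz.1, hz.2.1, hz.2.2.1, hz.2.2.2,
      pvWord_empty_iff 3 (by norm_num) a ha |>.mpr hz.1,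
      pvWord_empty_iff 2 (by norm_num) b hb |>.mpr hz.2.1,
      pvWord_empty_iff 1 (by norm_num) c hc |>.mpr hz.2.2.1,
      pvWord_empty_iff 0 (by norm_num) d hd |>.mpr hz.2.2.2]
  · rw [if_neg (by rw [hiff]; exact hz)]
    have hbool : (!decide (pvD a = 0) || !decide (pvD b = 0) || !decide (pvD c = 0) || !decide (pvD d = 0)) = true := by
      simp
      tauto
    rw [hbool, if_pos rfl]

lemma pvModEq (j : Int) : PySem.Int.mod j 4 = j % 4 := PySem.Int.mod_eq_emod_of_pos (by norm_num)
lemma pvDivEq (j : Int) : PySem.Int.floordiv j 4 = j / 4 := PySem.Int.floordiv_eq_ediv_of_pos (by norm_num)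

-- B's body away from a group boundary
lemma pvBodyB_mid (L i : Int) (u : Int) (hu : PySem.Int.mod (L - 1 - i) 4 = u) (hu0 : u ≠ 0)
    (st : List Char × Bool) (c : Char) :
    pvBodyB L st (i, c) = (st.1 ++ pvWord u c, st.2 || !decide (pvD c = 0)) := by
  simp only [pvBodyB, pvWord, pvD, hu]
  by_cases h : (PySem.Int.ofChars? [c]).getD 0 = 0 <;> simp [h, hu0]

-- B's body at a group boundary
lemma pvBodyB_bdry (L i : Int) (k : Nat) (hu : PySem.Int.mod (L - 1 - i) 4 = 0)
    (hk : PySem.Int.floordiv (L - 1 - i) 4 = (k : Int)) (st : List Char × Bool) (c : Char) :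
    pvBodyB L st (i, c) =
      (st.1 ++ pvWord 0 c ++
        (if st.2 || !decide (pvD c = 0) then PySem.List.pyGetD bigUnitsK (k : Int) [] else []), false) := by
  simp only [pvBodyB, pvWord, pvD, hu, hk]
  by_cases h : (PySem.Int.ofChars? [c]).getD 0 = 0 <;> rcases st with ⟨r, fl⟩ <;> cases fl <;> simp [h]

lemma pvB_main : ∀ (m : Nat) (rest : List Char) (i0 L : Int) (r : List Char),
    rest.length = 4 * m → L = i0 + 4 * m → (∀ c ∈ rest, c.isDigit = true) →
    (PySem.List.enumerate rest i0).foldl (pvBodyB L) (r, false) = (r ++ pvGroups rest m, false) := by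
  intro m
  induction m with
  | zero =>
    intro rest i0 L r hlen hL hd
    have : rest = [] := List.eq_nil_of_length_eq_zero (by omega)
    subst this
    simp [PySem.List.enumerate_nil, pvGroups]
  | succ m ih =>
    intro rest i0 L r hlen hL hd
    match rest, hlen with
    | a :: b :: c :: d :: t, hlen =>
      have ht : t.length = 4 * m := by simp at hlen; omega
      simp only [PySem.List.enumerate_cons, List.foldl_cons]
      rw [pvBodyB_mid L i0 3 (by rw [pvModEq]; omega) (by norm_num),
          pvBodyB_mid L (i0+1) 2 (by rw [pvModEq]; omega) (by norm_num),
          pvBodyB_mid L (i0+1+1) 1 (by rw [pvModEq]; omega) (by norm_num),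
          pvBodyB_bdry L (i0+1+1+1) m (by rw [pvModEq]; omega) (by rw [pvDivEq]; omega)]
      rw [ih t (i0+1+1+1+1) L _ ht (by omega)
          (fun x hx => hd x (by simp [hx]))]
      simp only [pvGroups, List.take_succ_cons, List.drop_succ_cons, List.take_zero, List.drop_zero]
      rw [pvChunk_quad a b c d (hd a (by simp)) (hd b (by simp)) (hd c (by simp)) (hd d (by simp)) m]
      simp [List.append_assoc]

lemma pvB_shift : ∀ (cs : List Char) (i0 L k : Int) (st : List Char × Bool),
    (PySem.List.enumerate cs i0).foldl (pvBodyB L) st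
      = (PySem.List.enumerate cs (i0 + k)).foldl (pvBodyB (L + k)) st := by
  intro cs
  induction cs with
  | nil => intro i0 L k st; simp [PySem.List.enumerate_nil]
  | cons c t ih =>
    intro i0 L k st
    simp only [PySem.List.enumerate_cons, List.foldl_cons]
    have hpos : L + k - 1 - (i0 + k) = L - 1 - i0 := by ring
    have hstep : pvBodyB (L + k) st (i0 + k, c) = pvBodyB L st (i0, c) := by
      simp only [pvBodyB, hpos]
    rw [hstep]
    rw [ih (i0 + 1) L k (pvBodyB L st (i0, c)),
      show i0 + 1 + k = i0 + k + 1 from by ring]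

lemma pvB_zeros : ∀ (z : Nat) (i0 L : Int) (st : List Char × Bool),
    (∀ i : Int, i0 ≤ i → i < i0 + z → PySem.Int.mod (L - 1 - i) 4 ≠ 0) →
    (PySem.List.enumerate (List.replicate z '0') i0).foldl (pvBodyB L) st = st := by
  intro z
  induction z with
  | zero => intro i0 L st h; simp [PySem.List.enumerate_nil]
  | succ z ih =>
    intro i0 L st h
    rw [List.replicate_succ]
    simp only [PySem.List.enumerate_cons, List.foldl_cons]
    have hstep : pvBodyB L st (i0, '0') = st := by
      simp only [pvBodyB]
      rw [if_neg (by decide : ¬((PySem.Int.ofChars? ['0']).getD 0 ≠ 0)),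
        if_neg (h i0 le_rfl (by push_cast; omega))]
    rw [hstep]
    exact ih (i0 + 1) L st (fun i h1 h2 => h i (by omega) (by push_cast at h2 ⊢; omega))

lemma pvBodyA_eq (p : List Char) (gc : Int) (result : List Char) (g : Int) :
    pvBodyA p gc result g =
      (if pvRead (PySem.List.slice p (some (g * 4)) (some ((g + 1) * 4))) ≠ [] then
        result ++ (pvRead (PySem.List.slice p (some (g * 4)) (some ((g + 1) * 4))) ++
          PySem.List.pyGetD bigUnitsK (gc - g - 1) []) else result) := rfl

lemma pvA_main (p : List Char) (gcI : Int) : ∀ (m j : Nat) (acc : List Char), gcI = ((j + m : Nat) : Int) →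
    (PySem.List.pyRange (j : Int) gcI 1).foldl (pvBodyA p gcI) acc = acc ++ pvGroups (p.drop (4 * j)) m := by
  intro m
  induction m with
  | zero =>
    intro j acc hgc
    subst hgc
    push_cast
    simp [pysem, pvGroups]
  | succ m ih =>
    intro j acc hgc
    have hj : (j : Int) < gcI := by rw [hgc]; push_cast; omega
    rw [PySem.List.pyRange_one_cons hj, List.foldl_cons, pvBodyA_eq]
    have hsl : PySem.List.slice p (some ((j : Int) * 4)) (some (((j : Int) + 1) * 4))
        = (p.drop (4 * j)).take 4 := by
      rw [show ((j : Int) * 4) = ((4 * j : Nat) : Int) from by push_cast; ring,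
          show (((j : Nat) : Int) + 1) * 4 = ((4 * j + 4 : Nat) : Int) from by push_cast; ring,
          PySem.List.slice_natCast]
      congr 1
      omega
    have hbig : gcI - (j : Int) - 1 = ((m : Nat) : Int) := by rw [hgc]; push_cast; omega
    rw [hsl, hbig]
    have hstep : (if pvRead ((p.drop (4 * j)).take 4) ≠ [] then
        acc ++ (pvRead ((p.drop (4 * j)).take 4) ++ PySem.List.pyGetD bigUnitsK ((m : Nat) : Int) []) else acc)
        = acc ++ pvChunk ((p.drop (4 * j)).take 4) m := by
      rw [pvChunk]
      by_cases h : pvRead ((p.drop (4 * j)).take 4) = [] <;> simp [h]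
    rw [hstep,
      show ((j : Int) + 1) = ((j + 1 : Nat) : Int) from by push_cast; ring,
      ih (j + 1) _ (by rw [hgc]; push_cast; ring)]
    have hdrop : (p.drop (4 * j)).drop 4 = p.drop (4 * (j + 1)) := by
      rw [List.drop_drop]
      rw [show 4 * j + 4 = 4 * (j + 1) from by ring]
    rw [List.append_assoc,
      show pvGroups (p.drop (4 * j)) (m + 1)
        = pvChunk ((p.drop (4 * j)).take 4) m ++ pvGroups ((p.drop (4 * j)).drop 4) m from rfl,
      hdrop]

lemma pvZfill (cs : List Char) (k : Nat) (h : ∀ c ∈ cs, c.isDigit = true) :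
    PySem.Chars.zfill cs ((k : Nat) : Int) = List.replicate (k - cs.length) '0' ++ cs := by
  rw [PySem.Chars.zfill.eq_def]
  by_cases hk : ((k : Nat) : Int) ≤ (cs.length : Int)
  · rw [if_pos hk]
    have : k - cs.length = 0 := by omega
    rw [this]
    simp
  · rw [if_neg hk]
    cases cs with
    | nil => simp
    | cons c t =>
      have hc := h c (by simp)
      have hb : 48 ≤ c.toNat ∧ c.toNat ≤ 57 := by
        revert hc
        show (decide _ && decide _) = true → _
        intro hc
        simp only [Bool.and_eq_true, decide_eq_true_eq] at hc
        exact ⟨hc.1, hc.2⟩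
      have hns : ¬(c = '+' ∨ c = '-') := by
        rintro (rfl | rfl) <;> revert hb <;> decide
      simp only [if_neg hns]
      simp

-- ===== VERDICT (by name: the statement is the Claim_ definition above) =====
theorem korean_sino_number_spec : Claim_equal_korean_sino_number := by
  intro n _ hpre
  have hpre' : 0 ≤ n := hpre
  unfold Spec_korean_sino_number
  by_cases h0 : n = 0
  · subst h0; rfl
  · have hcs : PySem.Int.toChars n = Nat.toDigits 10 n.toNat := by
      rw [PySem.Int.toChars, if_neg (by omega)]
    have hdig : ∀ c ∈ PySem.Int.toChars n, c.isDigit = true := fun c hc =>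
      Nat.isDigit_of_mem_toDigits (by norm_num) (by norm_num) (hcs ▸ hc)
    set cs := PySem.Int.toChars n with hcsdef
    set gcN := (cs.length + 3) / 4 with hgcdef
    have hgcast : PySem.Int.floordiv ((cs.length : Int) + 3) 4 = (gcN : Int) := by
      exact_mod_cast PySem.Int.floordiv_natCast (cs.length + 3) 4
    have hpad : PySem.Chars.zfill cs ((gcN : Int) * 4) = List.replicate (4 * gcN - cs.length) '0' ++ cs := by
      rw [show ((gcN : Int) * 4) = ((4 * gcN : Nat) : Int) from by push_cast; ring]
      exact pvZfill cs (4 * gcN) hdig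
    set padded := List.replicate (4 * gcN - cs.length) '0' ++ cs with hpaddef
    have hpadlen : padded.length = 4 * gcN := by
      rw [hpaddef]; simp; omega
    have hpaddig : ∀ c ∈ padded, c.isDigit = true := by
      intro c hc
      rcases List.mem_append.mp hc with h | h
      · rw [List.eq_of_mem_replicate h]; decide
      · exact hdig c h
    have hA : korean_sino_number n = String.ofList (pvGroups padded gcN) := by
      have e1 : korean_sino_number n = String.ofList
          ((PySem.List.pyRange 0 (PySem.Int.floordiv ((cs.length : Int) + 3) 4) 1).foldl
            (pvBodyA (PySem.Chars.zfill cs (PySem.Int.floordiv ((cs.length : Int) + 3) 4 * 4))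
              (PySem.Int.floordiv ((cs.length : Int) + 3) 4)) []) := by
        unfold korean_sino_number
        rw [if_neg h0]
        rfl
      rw [e1, hgcast, hpad]
      have hmA := pvA_main padded (gcN : Int) gcN 0 [] (by simp)
      simp only [Nat.cast_zero, Nat.mul_zero, List.drop_zero, List.nil_append] at hmA
      rw [hmA]
    have hB : korean_sino_number_alt n = String.ofList (pvGroups padded gcN) := by
      have e2 : korean_sino_number_alt n = String.ofList
          (((PySem.List.enumerate cs 0).foldl (pvBodyB (cs.length : Int)) ([], false)).1) := by
        unfold korean_sino_number_alt
        rw [if_neg h0]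
        rfl
      rw [e2]
      have hshift := pvB_shift cs 0 (cs.length : Int) ((4 * gcN - cs.length : Nat) : Int) ([], false)
      have hLz : (cs.length : Int) + ((4 * gcN - cs.length : Nat) : Int) = ((4 * gcN : Nat) : Int) := by
        push_cast; omega
      rw [hLz, zero_add] at hshift
      have hzeros := pvB_zeros (4 * gcN - cs.length) 0 ((4 * gcN : Nat) : Int) ([], false)
        (fun i h1 h2 => by rw [pvModEq]; push_cast at h2 ⊢; omega)
      have happ : PySem.List.enumerate padded 0
          = PySem.List.enumerate (List.replicate (4 * gcN - cs.length) '0') 0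
            ++ PySem.List.enumerate cs ((4 * gcN - cs.length : Nat) : Int) := by
        rw [hpaddef, PySem.List.enumerate_append]
        simp
      have hmB := pvB_main gcN padded 0 ((4 * gcN : Nat) : Int) [] hpadlen (by push_cast; omega) hpaddig
      rw [happ, List.foldl_append, hzeros] at hmB
      rw [hshift, hmB]
      simp
    rw [hA, hB]
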